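-- pv_equiv track=rewrite | github.com/lcgalans2024/Notas_Master | App_V2/utils/load_data.py | formar_pares
-- ===== SOURCE A (Python) =====
-- def formar_pares(columnas_validas):
--     """
--     Forma pares (col1, col2) dentro del mismo grupo, recorriendo de dos en dos.
--     Evita solapamientos y asegura que cada par esté bien formado.
--     """
--     pares = []
--     i = 0
--     while i < len(columnas_validas) - 1:
--         actual = columnas_validas[i]
--         siguiente = columnas_validas[i + 1]
--
--         grupo_actual = actual.split('.')[0]
--         grupo_siguiente = siguiente.split('.')[0]
--
--         if grupo_actual == grupo_siguiente:
--             pares.append((actual, siguiente))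
--             i += 2  # avanzar de dos en dos si se forma un par válido
--         else:
--             i += 1  # avanzar solo uno si no forma par válido
--
--     return pares
-- ===== SOURCE B (Python) =====
-- def _pair_run(run):
--     # pair a run's elements two at a time, dropping an odd leftover
--     out = []
--     it = iter(run)
--     for a in it:
--         b = next(it, None)
--         if b is None:
--             break
--         out.append((a, b))
--     return out
--
--
-- def formar_pares(columnas_validas):
--     pares = []
--     run = []  # current maximal run of consecutive columns sharing a prefix
--     for c in columnas_validas:
--         if run and c.split('.')[0] == run[-1].split('.')[0]:
--             run.append(c)
--         else:
--             pares.extend(_pair_run(run))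
--             run = [c]
--     pares.extend(_pair_run(run))
--     return pares
-- ===== Notes on version B (the rewrite author's own statement) =====
-- stated objective: alternative
-- what changed: Replaces A's single index walk with variable advance by a build-maximal-runs-first pass (grouping consecutive columns with equal prefix) followed by pairing each run two-at-a-time.
import Mathlib
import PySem

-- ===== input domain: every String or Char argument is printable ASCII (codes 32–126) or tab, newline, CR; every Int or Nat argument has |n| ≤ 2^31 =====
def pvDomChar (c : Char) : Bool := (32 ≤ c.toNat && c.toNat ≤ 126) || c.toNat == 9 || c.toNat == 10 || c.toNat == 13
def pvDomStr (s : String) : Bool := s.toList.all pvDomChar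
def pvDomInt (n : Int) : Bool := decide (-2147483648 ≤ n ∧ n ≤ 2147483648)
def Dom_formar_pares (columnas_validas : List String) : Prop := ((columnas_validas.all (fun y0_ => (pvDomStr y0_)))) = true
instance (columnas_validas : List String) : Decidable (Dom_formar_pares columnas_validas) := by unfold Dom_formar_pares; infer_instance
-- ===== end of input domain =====

-- B builds maximal runs of consecutive equal-prefix columns first, then pairs within each run
-- two-at-a-time, instead of A's single index walk with a variable 1/2 advance (objective: alternative).

-- s.split('.')[0]; splitOn never returns [], so the [0] indexing is the head (exact)
def pvKey (s : String) : String := ((PySem.Str.split? s ".").getD []).headD ""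

-- ===== PORT A =====
-- the while loop over index i; i is a Nat since it starts at 0 and only grows
def pvLoopA (xs : List String) (i : Nat) (pares : List (String × String)) :
    List (String × String) :=
  if h : i + 1 < xs.length then
    let actual := xs[i]
    let siguiente := xs[i + 1]
    if pvKey actual == pvKey siguiente then
      pvLoopA xs (i + 2) (pares ++ [(actual, siguiente)])
    else
      pvLoopA xs (i + 1) pares
  else pares
termination_by xs.length - i

def formar_pares (columnas_validas : List String) : List (String × String) :=
  pvLoopA columnas_validas 0 []

-- ===== PORT B =====
-- _pair_run: pair two at a time, dropping an odd leftover
def pvPairRun : List String → List (String × String)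
  | a :: b :: t => (a, b) :: pvPairRun t
  | _ => []

-- one step of B's for-loop over columns: extend the current run or flush it
def pvStepB (st : List (String × String) × List String) (c : String) :
    List (String × String) × List String :=
  match st with
  | (pares, run) =>
    match run.getLast? with
    | some last =>
        if pvKey c == pvKey last then (pares, run ++ [c])
        else (pares ++ pvPairRun run, [c])
    | none => (pares ++ pvPairRun run, [c])

def formar_pares_alt (columnas_validas : List String) : List (String × String) :=
  let st := columnas_validas.foldl pvStepB ([], [])
  st.1 ++ pvPairRun st.2

-- ===== PRECONDITION & SPEC =====
def Spec_formar_pares (columnas_validas : List String) (out : List (String × String)) : Prop := out = formar_pares_alt columnas_validas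
instance (columnas_validas : List String) (out : List (String × String)) : Decidable (Spec_formar_pares columnas_validas out) := by unfold Spec_formar_pares; infer_instance

-- ===== CLAIM (what is proved, stated in full; the proofs are below) =====
def Claim_equal_formar_pares : Prop := ∀ (columnas_validas : List String), Dom_formar_pares columnas_validas → Spec_formar_pares columnas_validas (formar_pares columnas_validas)

-- ===== LEMMAS AND PROOFS =====

-- the common greedy specification both ports compute
def pvGreedy : List String → List (String × String)
  | x :: y :: t =>
      if pvKey x = pvKey y then (x, y) :: pvGreedy t else pvGreedy (y :: t)
  | _ => []

lemma pvGreedy_short (l : List String) (h : l.length ≤ 1) : pvGreedy l = [] := by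
  match l, h with
  | [], _ => rfl
  | [x], _ => rfl

lemma pvLoopA_eq (xs : List String) (i : Nat) (acc : List (String × String)) :
    pvLoopA xs i acc = acc ++ pvGreedy (xs.drop i) := by
  rw [pvLoopA]
  split
  · next h =>
    have h0 : i < xs.length := by omega
    have hd : xs.drop i = xs[i] :: xs[i+1] :: xs.drop (i + 2) := by
      rw [List.drop_eq_getElem_cons h0, List.drop_eq_getElem_cons h]
    rw [hd]
    by_cases hk : pvKey xs[i] = pvKey xs[i+1]
    · simp only [hk, beq_self_eq_true, if_true, pvGreedy]
      rw [pvLoopA_eq xs (i+2)]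
      simp
    · have : (pvKey xs[i] == pvKey xs[i+1]) = false := by
        simpa using hk
      simp only [this, Bool.false_eq_true, if_false]
      rw [pvLoopA_eq xs (i+1)]
      have hd1 : xs.drop (i+1) = xs[i+1] :: xs.drop (i + 2) := by
        rw [List.drop_eq_getElem_cons h]
      rw [hd1, pvGreedy, if_neg hk]
  · next h =>
    rw [pvGreedy_short]
    · simp
    · have := List.length_drop (l := xs) (i := i)
      omega
termination_by xs.length - i

-- a uniform run pairs up exactly as the greedy does
lemma pvGreedy_uniform (k : String) :
    ∀ run : List String, (∀ x ∈ run, pvKey x = k) → pvGreedy run = pvPairRun run := by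
  intro run
  match run with
  | [] => intro _; rfl
  | [x] => intro _; rfl
  | x :: y :: t =>
    intro hu
    have hx : pvKey x = k := hu x (by simp)
    have hy : pvKey y = k := hu y (by simp)
    rw [pvGreedy, if_pos (hx.trans hy.symm), pvPairRun,
      pvGreedy_uniform k t (fun z hz => hu z (by simp [hz]))]

-- flushing a uniform run at a key change splits the greedy
lemma pvGreedy_flush (k : String) (c : String) (rest : List String) (hc : pvKey c ≠ k) :
    ∀ run : List String, (∀ x ∈ run, pvKey x = k) →
      pvGreedy (run ++ c :: rest) = pvPairRun run ++ pvGreedy (c :: rest) := by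
  intro run
  match run with
  | [] => intro _; rfl
  | [x] =>
    intro hu
    have hx : pvKey x = k := hu x (by simp)
    simp only [List.cons_append, List.nil_append, pvGreedy, pvPairRun]
    rw [if_neg (by rw [hx]; exact fun h => hc h.symm)]
  | x :: y :: t =>
    intro hu
    have hx : pvKey x = k := hu x (by simp)
    have hy : pvKey y = k := hu y (by simp)
    simp only [List.cons_append]
    rw [pvGreedy, if_pos (hx.trans hy.symm), pvPairRun,
      pvGreedy_flush k c rest hc t (fun z hz => hu z (by simp [hz]))]
    rfl

lemma pvLast_key (k : String) (run : List String) (hne : run ≠ [])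
    (hu : ∀ x ∈ run, pvKey x = k) : ∃ last, run.getLast? = some last ∧ pvKey last = k := by
  refine ⟨run.getLast hne, List.getLast?_eq_some_getLast hne, ?_⟩
  exact hu _ (List.getLast_mem hne)

-- the fold invariant: a nonempty uniform run in the state corresponds to the greedy on run ++ rest
lemma pvFold_inv (rest : List String) :
    ∀ (pares : List (String × String)) (run : List String) (k : String),
      run ≠ [] → (∀ x ∈ run, pvKey x = k) →
      (rest.foldl pvStepB (pares, run)).1 ++ pvPairRun (rest.foldl pvStepB (pares, run)).2
        = pares ++ pvGreedy (run ++ rest) := by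
  induction rest with
  | nil =>
    intro pares run k hne hu
    simp [pvGreedy_uniform k run hu]
  | cons c rest ih =>
    intro pares run k hne hu
    obtain ⟨last, hl, hlk⟩ := pvLast_key k run hne hu
    simp only [List.foldl_cons, pvStepB, hl]
    by_cases hk : pvKey c = k
    · rw [if_pos (by simp [hk, hlk])]
      rw [ih pares (run ++ [c]) k (by simp) (by
        intro x hx
        rcases List.mem_append.mp hx with h | h
        · exact hu x h
        · simp at h; simp [h, hk])]
      simp
    · rw [if_neg (by simp [hlk]; exact hk)]
      rw [ih (pares ++ pvPairRun run) [c] (pvKey c) (by simp) (by simp)]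
      rw [pvGreedy_flush k c rest (by simpa using hk) run hu]
      simp

-- ===== VERDICT (by name: the statement is the Claim_ definition above) =====
theorem formar_pares_spec : Claim_equal_formar_pares := by
  intro xs _
  unfold Spec_formar_pares formar_pares formar_pares_alt
  rw [pvLoopA_eq]
  cases xs with
  | nil => rfl
  | cons x t =>
    simp only [List.foldl_cons, pvStepB, List.getLast?_nil]
    have := pvFold_inv t [] [x] (pvKey x) (by simp) (by simp)
    simpa [pvPairRun] using this.symm
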